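-- pv_equiv track=rewrite | github.com/Ashutosh-AIBOT/Social-Media-Ads-Analysis-Dashboard | colab.py | p6b_leakage_check
-- ===== SOURCE A (Python) =====
-- def p6b_leakage_check(feature_cols):
--     leaky = ['ROI','Revenue','Profit','Profit_Margin',
--              'Revenue_per_Click','Profit_per_Campaign',
--              'ROI_x_Engagement','Is_Profitable',
--              'High_Engagement','High_Conversion']
--     found = [f for f in feature_cols if f in leaky]
--     clean = [f for f in feature_cols if f not in leaky]
--     return found, clean
-- ===== SOURCE B (Python) =====
-- def p6b_leakage_check(feature_cols):
--     leaky = frozenset(['ROI', 'Revenue', 'Profit', 'Profit_Margin',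
--                        'Revenue_per_Click', 'Profit_per_Campaign',
--                        'ROI_x_Engagement', 'Is_Profitable',
--                        'High_Engagement', 'High_Conversion'])
--     # Stable sort by the boolean key "not leaky" puts leaky features first,
--     # preserving original order within each group; then split at the leaky count.
--     ordered = sorted(feature_cols, key=lambda f: f not in leaky)
--     k = sum(f in leaky for f in feature_cols)
--     return ordered[:k], ordered[k:]
-- ===== Notes on version B (the rewrite author's own statement) =====
-- stated objective: alternative
-- what changed: Instead of A's two independent filtering comprehensions (each scanning the 10-element leaky list per feature), B stably sorts feature_cols by the boolean key 'not leaky' (stability keeps each group's original order), counts the leaky features, and slices the sorted list into (found, clean).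
import Mathlib
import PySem

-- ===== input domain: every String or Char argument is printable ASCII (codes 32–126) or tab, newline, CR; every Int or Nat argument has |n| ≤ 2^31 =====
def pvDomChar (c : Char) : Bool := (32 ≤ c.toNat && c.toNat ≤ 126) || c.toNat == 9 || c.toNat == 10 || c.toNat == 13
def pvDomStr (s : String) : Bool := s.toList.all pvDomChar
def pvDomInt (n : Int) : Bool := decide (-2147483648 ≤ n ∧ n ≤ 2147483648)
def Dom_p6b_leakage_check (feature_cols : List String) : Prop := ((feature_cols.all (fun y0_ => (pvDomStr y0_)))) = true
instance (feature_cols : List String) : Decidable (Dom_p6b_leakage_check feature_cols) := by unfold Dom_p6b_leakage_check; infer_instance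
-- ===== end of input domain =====

-- B replaces A's two filtering comprehensions by a stable sort on the boolean key "not leaky" followed by a count-and-split; same result, alternative algorithm.

-- ===== PORT A =====
def pvLeakyA : List String := ["ROI","Revenue","Profit","Profit_Margin",
  "Revenue_per_Click","Profit_per_Campaign",
  "ROI_x_Engagement","Is_Profitable",
  "High_Engagement","High_Conversion"]

def p6b_leakage_check (feature_cols : List String) : List String × List String :=
  let leaky := pvLeakyA
  let found := feature_cols.filter (fun f => leaky.contains f)
  let clean := feature_cols.filter (fun f => !(leaky.contains f))
  (found, clean)

-- ===== PORT B =====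
def pvLeakyB : PySem.Set String := PySem.Set.ofList ["ROI","Revenue","Profit","Profit_Margin",
  "Revenue_per_Click","Profit_per_Campaign",
  "ROI_x_Engagement","Is_Profitable",
  "High_Engagement","High_Conversion"]

def p6b_leakage_check_alt (feature_cols : List String) : List String × List String :=
  let leaky := pvLeakyB
  let ordered := PySem.List.sorted feature_cols (fun f => !(leaky.contains f))
  let k : Int := (feature_cols.map (fun f => if leaky.contains f then (1 : Int) else 0)).sum
  (PySem.List.slice ordered none (some k), PySem.List.slice ordered (some k) none)

-- ===== PRECONDITION & SPEC =====
def Spec_p6b_leakage_check (feature_cols : List String) (out : List String × List String) : Prop := out = p6b_leakage_check_alt feature_cols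
instance (feature_cols : List String) (out : List String × List String) : Decidable (Spec_p6b_leakage_check feature_cols out) := by unfold Spec_p6b_leakage_check; infer_instance

-- ===== CLAIM (what is proved, stated in full; the proofs are below) =====
def Claim_equal_p6b_leakage_check : Prop := ∀ (feature_cols : List String), Dom_p6b_leakage_check feature_cols → Spec_p6b_leakage_check feature_cols (p6b_leakage_check feature_cols)

-- ===== LEMMAS AND PROOFS =====

-- inserting a false-keyed element goes right after the false-keyed prefix (stability)
theorem pv_insertBy_false {α : Type} (key : α → Bool) (x : α) (hx : key x = false)
    (F C : List α) (hF : ∀ y ∈ F, key y = false) (hC : ∀ y ∈ C, key y = true) :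
    PySem.List.insertBy (fun a b => decide (key a < key b)) x (F ++ C) = F ++ x :: C := by
  induction F with
  | nil =>
    cases C with
    | nil => simp [PySem.List.insertBy]
    | cons c cs =>
      have hc : key c = true := hC c (by simp)
      simp [PySem.List.insertBy, hx, hc]
  | cons a F ih =>
    have ha : key a = false := hF a (by simp)
    have := ih (fun y hy => hF y (by simp [hy]))
    simp [PySem.List.insertBy, hx, ha, this]

-- inserting a true-keyed element goes to the very end
theorem pv_insertBy_true {α : Type} (key : α → Bool) (x : α) (hx : key x = true)
    (ys : List α) :
    PySem.List.insertBy (fun a b => decide (key a < key b)) x ys = ys ++ [x] := by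
  apply PySem.List.insertBy_of_forall_not_before
  intro y _
  simp [hx]

-- the insertion-sort fold on a boolean key builds (false-keyed prefix) ++ (true-keyed suffix)
theorem pv_fold_insertBy_partition {α : Type} (key : α → Bool) (xs : List α)
    (F C : List α) (hF : ∀ y ∈ F, key y = false) (hC : ∀ y ∈ C, key y = true) :
    List.foldl (fun acc x => PySem.List.insertBy (fun a b => decide (key a < key b)) x acc) (F ++ C) xs
      = (F ++ xs.filter (fun x => !key x)) ++ (C ++ xs.filter key) := by
  induction xs generalizing F C with
  | nil => simp
  | cons x xs ih =>
    by_cases hx : key x = true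
    · have step : PySem.List.insertBy (fun a b => decide (key a < key b)) x (F ++ C) = F ++ (C ++ [x]) := by
        rw [pv_insertBy_true key x hx, List.append_assoc]
      have hC' : ∀ y ∈ C ++ [x], key y = true := by
        intro y hy
        rcases List.mem_append.1 hy with h | h
        · exact hC y h
        · simp at h; subst h; exact hx
      simp only [List.foldl_cons, step, ih F (C ++ [x]) hF hC', hx, List.filter_cons]
      simp
    · have hx' : key x = false := by simpa using hx
      have step : PySem.List.insertBy (fun a b => decide (key a < key b)) x (F ++ C) = (F ++ [x]) ++ C := by
        rw [pv_insertBy_false key x hx' F C hF hC, List.append_assoc]; rfl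
      have hF' : ∀ y ∈ F ++ [x], key y = false := by
        intro y hy
        rcases List.mem_append.1 hy with h | h
        · exact hF y h
        · simp at h; subst h; exact hx'
      simp only [List.foldl_cons, step, ih (F ++ [x]) C hF' hC, List.filter_cons]
      simp [hx']

-- stable sort by a boolean key is exactly the two-way partition
theorem pv_sorted_bool_partition {α : Type} (key : α → Bool) (xs : List α) :
    PySem.List.sorted xs key = xs.filter (fun x => !key x) ++ xs.filter key := by
  rw [PySem.List.sorted_eq_foldl_insertBy]
  have := pv_fold_insertBy_partition key xs [] [] (by simp) (by simp)
  simpa using this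

theorem pvLeakyB_eq : pvLeakyB = pvLeakyA := by decide

-- ===== VERDICT (by name: the statement is the Claim_ definition above) =====
theorem p6b_leakage_check_spec : Claim_equal_p6b_leakage_check := by
  intro fc _
  unfold Spec_p6b_leakage_check p6b_leakage_check p6b_leakage_check_alt
  rw [pvLeakyB_eq]
  simp only [PySem.List.sum_map_ite_one_zero, PySem.List.slice_to_natCast,
    PySem.List.slice_from_natCast, List.countP_eq_length_filter,
    pv_sorted_bool_partition, Bool.not_not]
  exact congrArg₂ Prod.mk List.take_left.symm List.drop_left.symm
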